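-- pv_equiv track=rewrite | github.com/ParzvaI/CapStoneProject | app.py | body_extracter
-- ===== SOURCE A (Python) =====
-- def body_extracter(smp):
--     lz1=[]
--     temp=[]
--     for i in smp.split("\n"):
--         temp.append(i)
--         if ":" in i:
--             if ord(i[0]) in range(65,91) and i[:i.find(":")].lower() not in ["http","https"] and " " not in i[:i.find(":")]:
--                 lz1.append(temp)
--                 temp=[]
--     lz1.append(temp)
--     lenz=[len(i) for i in lz1]
--     stmp="\n".join(lz1[::-1][lenz[::-1].index(max(lenz))])
--     if "Date" in stmp[:stmp.find(":")]:
--         stmp="\n".join(map(str.lstrip,stmp.split("\n")[2:]))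
--     return "\n".join([j for j in stmp[stmp.find(":")+1:].lstrip().split("\n") if len(j.lstrip())!=0])
-- ===== SOURCE B (Python) =====
-- def _is_header(line):
--     if ":" not in line:
--         return False
--     head = line[:line.find(":")]
--     return 65 <= ord(line[0]) < 91 and head.lower() not in ("http", "https") and " " not in head
--
--
-- def _tail(stmp):
--     if "Date" in stmp[:stmp.find(":")]:
--         stmp = "\n".join(part.lstrip() for part in stmp.split("\n")[2:])
--     body = stmp[stmp.find(":") + 1:].lstrip()
--     return "\n".join(part for part in body.split("\n") if part.lstrip())
--
--
-- def body_extracter(smp):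
--     best, best_len = [], -1
--     temp = []
--     for line in smp.split("\n"):
--         temp.append(line)
--         if _is_header(line):
--             if best_len <= len(temp):
--                 best, best_len = temp, len(temp)
--             temp = []
--     if best_len <= len(temp):
--         best = temp
--     return _tail("\n".join(best))
-- ===== Notes on version B (the rewrite author's own statement) =====
-- stated objective: simpler
-- what changed: B drops A's materialised list of groups, the lenz length list and the lz1[::-1][lenz[::-1].index(max(lenz))] reversal trick, instead keeping a single running (best, best_len) pair updated with <= during one pass (last longest group wins), and factors the header test and the extraction tail into helpers.
import Mathlib
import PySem

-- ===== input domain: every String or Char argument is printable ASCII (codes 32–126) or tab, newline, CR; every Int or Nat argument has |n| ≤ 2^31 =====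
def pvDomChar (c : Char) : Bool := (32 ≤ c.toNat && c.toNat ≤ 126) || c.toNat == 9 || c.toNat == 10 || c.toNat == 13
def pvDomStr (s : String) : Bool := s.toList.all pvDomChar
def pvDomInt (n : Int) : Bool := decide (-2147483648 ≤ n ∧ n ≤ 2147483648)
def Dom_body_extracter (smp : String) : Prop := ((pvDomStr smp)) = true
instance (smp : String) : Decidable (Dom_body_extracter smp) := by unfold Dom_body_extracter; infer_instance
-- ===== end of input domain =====

-- B replaces A's list-of-groups + lenz + reversal/index last-maximum selection by a one-pass
-- running (best, best_len) accumulator (objective: simpler); return values are proved equal.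

-- ===== PORT A =====
-- literal port of A; every `.getD` fallback is unreachable on the values A reaches
-- ("\n" ≠ "" so split? succeeds; max/index/[] are taken on a nonempty list containing the element).
-- `ord(i[0]) in range(65,91)` is ported as the bound check 65 ≤ ord(i[0]) < 91 it denotes.
def body_extracter (smp : String) : String :=
  let st := ((PySem.Str.split? smp "\n").getD []).foldl
    (fun (s : List (List String) × List String) i =>
      let temp := s.2 ++ [i]
      if PySem.Str.isIn ":" i then
        if (decide (65 ≤ ((PySem.Str.pyGet? i 0).getD ' ').toNat) &&
            decide (((PySem.Str.pyGet? i 0).getD ' ').toNat < 91)) &&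
           !(PySem.Str.lower (PySem.Str.slice i none (some (PySem.Str.find i ":"))) == "http" ||
             PySem.Str.lower (PySem.Str.slice i none (some (PySem.Str.find i ":"))) == "https") &&
           !(PySem.Str.isIn " " (PySem.Str.slice i none (some (PySem.Str.find i ":")))) then
          (s.1 ++ [temp], ([] : List String))
        else (s.1, temp)
      else (s.1, temp))
    ([], [])
  let lz1 := st.1 ++ [st.2]
  let lenz : List Int := lz1.map (fun g => (g.length : Int))
  let stmp := PySem.Str.join "\n"
    ((PySem.List.pyGet? ((PySem.List.slice? lz1 none none (-1)).getD [])
      (((PySem.List.index? ((PySem.List.slice? lenz none none (-1)).getD [])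
        ((PySem.List.max? lenz (fun x => x)).getD 0)).getD 0 : Nat) : Int)).getD [])
  let stmp2 := if PySem.Str.isIn "Date" (PySem.Str.slice stmp none (some (PySem.Str.find stmp ":")))
    then PySem.Str.join "\n" ((PySem.List.slice ((PySem.Str.split? stmp "\n").getD []) (some 2) none).map PySem.Str.lstrip)
    else stmp
  PySem.Str.join "\n"
    (((PySem.Str.split? (PySem.Str.lstrip (PySem.Str.slice stmp2 (some (PySem.Str.find stmp2 ":" + 1)) none)) "\n").getD []).filter
      (fun j => PySem.Str.len (PySem.Str.lstrip j) != 0))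

-- ===== PORT B =====
-- port of Source B's helper _is_header
def pvIsHeader (line : String) : Bool :=
  if !(PySem.Str.isIn ":" line) then false
  else
    (decide (65 ≤ ((PySem.Str.pyGet? line 0).getD ' ').toNat) &&
     decide (((PySem.Str.pyGet? line 0).getD ' ').toNat < 91)) &&
    !(PySem.Str.lower (PySem.Str.slice line none (some (PySem.Str.find line ":"))) == "http" ||
      PySem.Str.lower (PySem.Str.slice line none (some (PySem.Str.find line ":"))) == "https") &&
    !(PySem.Str.isIn " " (PySem.Str.slice line none (some (PySem.Str.find line ":"))))

-- port of Source B's helper _tail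
def pvTail (stmp : String) : String :=
  let stmp2 := if PySem.Str.isIn "Date" (PySem.Str.slice stmp none (some (PySem.Str.find stmp ":")))
    then PySem.Str.join "\n" ((PySem.List.slice ((PySem.Str.split? stmp "\n").getD []) (some 2) none).map PySem.Str.lstrip)
    else stmp
  PySem.Str.join "\n"
    (((PySem.Str.split? (PySem.Str.lstrip (PySem.Str.slice stmp2 (some (PySem.Str.find stmp2 ":" + 1)) none)) "\n").getD []).filter
      (fun j => PySem.Str.len (PySem.Str.lstrip j) != 0))

def body_extracter_alt (smp : String) : String :=
  let st := ((PySem.Str.split? smp "\n").getD []).foldl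
    (fun (s : (List String × Int) × List String) line =>
      let temp := s.2 ++ [line]
      if pvIsHeader line then
        (if s.1.2 ≤ (temp.length : Int) then (temp, (temp.length : Int)) else s.1, ([] : List String))
      else (s.1, temp))
    ((([], -1)), [])
  pvTail (PySem.Str.join "\n" (if st.1.2 ≤ (st.2.length : Int) then st.2 else st.1.1))

-- ===== PRECONDITION & SPEC =====
def Spec_body_extracter (smp : String) (out : String) : Prop := out = body_extracter_alt smp
instance (smp : String) (out : String) : Decidable (Spec_body_extracter smp out) := by unfold Spec_body_extracter; infer_instance

-- ===== CLAIM (what is proved, stated in full; the proofs are below) =====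
def Claim_equal_body_extracter : Prop := ∀ (smp : String), Dom_body_extracter smp → Spec_body_extracter smp (body_extracter smp)

-- ===== LEMMAS AND PROOFS =====

-- B's running-best update, as a step function on (best, best_len)
def pvSelStep (b : List String × Int) (g : List String) : List String × Int :=
  if b.2 ≤ (g.length : Int) then (g, (g.length : Int)) else b

-- B's selection of the last longest group, as a fold over the finished group list
def pvSel (gs : List (List String)) : List String × Int := gs.foldl pvSelStep ([], -1)

theorem pvSel_append (gs : List (List String)) (g : List String) :
    pvSel (gs ++ [g]) = pvSelStep (pvSel gs) g := by
  simp [pvSel, List.foldl_append]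

-- A's reversal/index/max selection equals B's running best (max? value and the picked group).
theorem sel_eq_aux (gs : List (List String)) (h : gs ≠ []) :
    PySem.List.max? (gs.map (fun g => (g.length : Int))) (fun x => x) = some (pvSel gs).2 ∧
    ∃ k, PySem.List.index? ((gs.map (fun g => (g.length : Int))).reverse) (pvSel gs).2 = some k ∧
      gs.reverse[k]? = some (pvSel gs).1 := by
  induction gs using List.reverseRecOn with
  | nil => exact absurd rfl h
  | append_singleton hs g ih =>
    by_cases hhs : hs = []
    · subst hhs
      have hsel : pvSel ([] ++ [g]) = (g, (g.length : Int)) := by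
        simp only [List.nil_append, pvSel, List.foldl_cons, List.foldl_nil, pvSelStep]
        rw [if_pos (by omega)]
      rw [hsel]
      refine ⟨?_, 0, ?_, by simp⟩
      · -- max? [len g] = some (len g)
        rcases ho : PySem.List.max? ((([] ++ [g] : List (List String))).map (fun g => (g.length : Int))) (fun x => x) with _ | m
        · rw [PySem.List.max?_eq_none_iff] at ho; simp at ho
        · have hm := PySem.List.max?_mem ho
          simp only [List.nil_append, List.map_cons, List.map_nil, List.mem_cons,
            List.not_mem_nil, or_false] at hm
          rw [ho, hm]
      · simp only [List.nil_append, List.map_cons, List.map_nil, List.reverse_cons,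
          List.reverse_nil, List.nil_append]
        exact PySem.List.index?_cons_self _ _
    · obtain ⟨ihmax, k, ihidx, ihget⟩ := ih hhs
      have hmem : (pvSel hs).2 ∈ hs.map (fun g => (g.length : Int)) := PySem.List.max?_mem ihmax
      have hmax : ∀ y ∈ hs.map (fun g => (g.length : Int)), y ≤ (pvSel hs).2 := by
        intro y hy; exact PySem.List.max?_isMax ihmax y hy
      rw [pvSel_append]
      -- the new maximum value
      have hnew : ∀ m', PySem.List.max? ((hs ++ [g]).map (fun g => (g.length : Int))) (fun x => x) = some m' →
          m' = (pvSelStep (pvSel hs) g).2 := by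
        intro m' hm'
        have h1 := PySem.List.max?_mem hm'
        have h2 := PySem.List.max?_isMax hm'
        simp only [List.map_append, List.map_cons, List.map_nil, List.mem_append, List.mem_cons,
          List.not_mem_nil, or_false] at h1 h2
        unfold pvSelStep
        split
        · rename_i hle
          -- new best is g
          have hg : ((g.length : Nat) : Int) ≤ m' := h2 _ (Or.inr rfl)
          rcases h1 with h1 | h1
          · exact le_antisymm (le_trans (hmax _ h1) hle) hg
          · omega
        · rename_i hgt
          rw [not_le] at hgt
          have hM : (pvSel hs).2 ≤ m' := h2 _ (Or.inl hmem)
          rcases h1 with h1 | h1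
          · exact le_antisymm (hmax _ h1) hM
          · omega
      have hsome : ∃ m', PySem.List.max? ((hs ++ [g]).map (fun g => (g.length : Int))) (fun x => x) = some m' := by
        rcases ho : PySem.List.max? ((hs ++ [g]).map (fun g => (g.length : Int))) (fun x => x) with _ | m'
        · rw [PySem.List.max?_eq_none_iff] at ho; simp at ho
        · exact ⟨m', ho⟩
      obtain ⟨m', hm'⟩ := hsome
      have hmval := hnew m' hm'
      subst hmval
      refine ⟨hm', ?_⟩
      have hrev : ((hs ++ [g]).map (fun g => (g.length : Int))).reverse
          = ((g.length : Nat) : Int) :: (hs.map (fun g => (g.length : Int))).reverse := by simp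
      have hrevg : (hs ++ [g]).reverse = g :: hs.reverse := by simp
      unfold pvSelStep
      split
      · rename_i hle
        refine ⟨0, ?_, by rw [hrevg]; simp⟩
        rw [hrev]
        exact PySem.List.index?_cons_self _ _
      · rename_i hgt
        rw [not_le] at hgt
        refine ⟨k + 1, ?_, by rw [hrevg]; simpa using ihget⟩
        have hne : ((g.length : Nat) : Int) ≠ (pvSel hs).2 := by omega
        rw [hrev, PySem.List.index?_cons_of_ne _ hne, ihidx]
        rfl

-- A's full selection expression (reversed lists, index of max, python get) equals B's running best.
theorem sel_eq (gs : List (List String)) (h : gs ≠ []) :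
    (PySem.List.pyGet? ((PySem.List.slice? gs none none (-1)).getD [])
      (((PySem.List.index? ((PySem.List.slice? (gs.map (fun g => (g.length : Int))) none none (-1)).getD [])
        ((PySem.List.max? (gs.map (fun g => (g.length : Int))) (fun x => x)).getD 0)).getD 0 : Nat) : Int)).getD []
    = (pvSel gs).1 := by
  obtain ⟨hmax, k, hidx, hget⟩ := sel_eq_aux gs h
  rw [PySem.List.slice?_none_none_neg_one, PySem.List.slice?_none_none_neg_one]
  simp only [Option.getD_some, hmax, hidx, PySem.List.pyGet?_natCast]
  rw [hget]
  rfl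

-- the two loop bodies preserve: B's best accumulator is pvSel of A's group list, temps are equal
theorem loop_eq (lines : List String) : ∀ (L : List (List String)) (t : List String),
    lines.foldl
      (fun (s : (List String × Int) × List String) line =>
        let temp := s.2 ++ [line]
        if pvIsHeader line then
          (if s.1.2 ≤ (temp.length : Int) then (temp, (temp.length : Int)) else s.1, ([] : List String))
        else (s.1, temp))
      (pvSel L, t)
    = (pvSel (lines.foldl
        (fun (s : List (List String) × List String) i =>
          let temp := s.2 ++ [i]
          if PySem.Str.isIn ":" i then
            if (decide (65 ≤ ((PySem.Str.pyGet? i 0).getD ' ').toNat) &&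
                decide (((PySem.Str.pyGet? i 0).getD ' ').toNat < 91)) &&
               !(PySem.Str.lower (PySem.Str.slice i none (some (PySem.Str.find i ":"))) == "http" ||
                 PySem.Str.lower (PySem.Str.slice i none (some (PySem.Str.find i ":"))) == "https") &&
               !(PySem.Str.isIn " " (PySem.Str.slice i none (some (PySem.Str.find i ":")))) then
              (s.1 ++ [temp], ([] : List String))
            else (s.1, temp)
          else (s.1, temp))
        (L, t)).1,
       (lines.foldl
        (fun (s : List (List String) × List String) i =>
          let temp := s.2 ++ [i]
          if PySem.Str.isIn ":" i then
            if (decide (65 ≤ ((PySem.Str.pyGet? i 0).getD ' ').toNat) &&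
                decide (((PySem.Str.pyGet? i 0).getD ' ').toNat < 91)) &&
               !(PySem.Str.lower (PySem.Str.slice i none (some (PySem.Str.find i ":"))) == "http" ||
                 PySem.Str.lower (PySem.Str.slice i none (some (PySem.Str.find i ":"))) == "https") &&
               !(PySem.Str.isIn " " (PySem.Str.slice i none (some (PySem.Str.find i ":")))) then
              (s.1 ++ [temp], ([] : List String))
            else (s.1, temp)
          else (s.1, temp))
        (L, t)).2) := by
  induction lines with
  | nil => intro L t; rfl
  | cons i rest ih =>
    intro L t
    simp only [List.foldl_cons]
    by_cases h1 : PySem.Str.isIn ":" i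
    · by_cases h2 : ((decide (65 ≤ ((PySem.Str.pyGet? i 0).getD ' ').toNat) &&
                decide (((PySem.Str.pyGet? i 0).getD ' ').toNat < 91)) &&
               !(PySem.Str.lower (PySem.Str.slice i none (some (PySem.Str.find i ":"))) == "http" ||
                 PySem.Str.lower (PySem.Str.slice i none (some (PySem.Str.find i ":"))) == "https") &&
               !(PySem.Str.isIn " " (PySem.Str.slice i none (some (PySem.Str.find i ":"))))) = true
      · have hh : pvIsHeader i = true := by unfold pvIsHeader; rw [h1]; exact h2
        simp only [hh, h1, h2, if_true]
        have : (if (pvSel L).2 ≤ ((t ++ [i]).length : Int)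
                 then (t ++ [i], ((t ++ [i]).length : Int)) else pvSel L)
               = pvSel (L ++ [t ++ [i]]) := by
          rw [pvSel_append]; rfl
        rw [this]
        exact ih (L ++ [t ++ [i]]) []
      · have hh : pvIsHeader i = false := by
          unfold pvIsHeader; rw [h1]; exact Bool.eq_false_iff.mpr h2
        simp only [hh, h1, h2, if_true, if_false, Bool.false_eq_true]
        exact ih L (t ++ [i])
    · have h1' : PySem.Str.isIn ":" i = false := Bool.eq_false_iff.mpr h1
      have hh : pvIsHeader i = false := by
        unfold pvIsHeader; rw [h1']; rfl
      simp only [hh, h1', if_false, Bool.false_eq_true]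
      exact ih L (t ++ [i])

-- ===== VERDICT (by name: the statement is the Claim_ definition above) =====
theorem body_extracter_spec : Claim_equal_body_extracter := by
  intro smp _
  show body_extracter smp = body_extracter_alt smp
  unfold body_extracter body_extracter_alt
  simp only []
  generalize (PySem.Str.split? smp "\n").getD [] = lines
  rw [show (((([] : List String), (-1 : Int))), ([] : List String)) = (pvSel [], ([] : List String)) from rfl]
  rw [loop_eq lines [] []]
  set stA := lines.foldl
        (fun (s : List (List String) × List String) i =>
          let temp := s.2 ++ [i]
          if PySem.Str.isIn ":" i then
            if (decide (65 ≤ ((PySem.Str.pyGet? i 0).getD ' ').toNat) &&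
                decide (((PySem.Str.pyGet? i 0).getD ' ').toNat < 91)) &&
               !(PySem.Str.lower (PySem.Str.slice i none (some (PySem.Str.find i ":"))) == "http" ||
                 PySem.Str.lower (PySem.Str.slice i none (some (PySem.Str.find i ":"))) == "https") &&
               !(PySem.Str.isIn " " (PySem.Str.slice i none (some (PySem.Str.find i ":")))) then
              (s.1 ++ [temp], ([] : List String))
            else (s.1, temp)
          else (s.1, temp))
        (([] : List (List String)), ([] : List String)) with hstA
  have hsel : (if (pvSel stA.1).2 ≤ ((stA.2).length : Int) then stA.2 else (pvSel stA.1).1)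
      = (pvSel (stA.1 ++ [stA.2])).1 := by
    rw [pvSel_append]; unfold pvSelStep; split <;> rfl
  rw [hsel, ← sel_eq (stA.1 ++ [stA.2]) (by simp)]
  rfl
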